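-- pv_equiv track=rewrite | github.com/juni8453/python_practice | algorithm/graph/keys_and_rooms.py | solution
-- ===== SOURCE A (Python) =====
-- def solution(rooms):
--   # visited2 = [[False] * len(rooms)] 2차원으로 생성할 때 주로 사용
--   # visited3 = [False] * len(rooms) 1차원으로 생성할 때 주로 사용
--   visited = [False] * len(rooms)
--
--   def dfs(cur_v):
--     visited[cur_v] = True
--     for next_v in rooms[cur_v]:
--       if not visited[next_v]:
--         dfs(next_v)
--
--   dfs(0)
--
--   return all(visited)
-- ===== SOURCE B (Python) =====
-- def solution(rooms):
--     visited = [False] * len(rooms)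
--     stack = [0]
--     while stack:
--         node = stack.pop()
--         if visited[node]:
--             continue
--         visited[node] = True
--         for nxt in rooms[node]:
--             if not visited[nxt]:
--                 stack.append(nxt)
--     return all(visited)
-- ===== Notes on version B (the rewrite author's own statement) =====
-- stated objective: alternative
-- what changed: Replaces the recursive closure-mutating DFS helper with an iterative explicit-stack traversal over a visited array (pop a node, skip if seen, mark it and push its unseen keys), keeping all(visited) as the verdict.
import Mathlib
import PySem

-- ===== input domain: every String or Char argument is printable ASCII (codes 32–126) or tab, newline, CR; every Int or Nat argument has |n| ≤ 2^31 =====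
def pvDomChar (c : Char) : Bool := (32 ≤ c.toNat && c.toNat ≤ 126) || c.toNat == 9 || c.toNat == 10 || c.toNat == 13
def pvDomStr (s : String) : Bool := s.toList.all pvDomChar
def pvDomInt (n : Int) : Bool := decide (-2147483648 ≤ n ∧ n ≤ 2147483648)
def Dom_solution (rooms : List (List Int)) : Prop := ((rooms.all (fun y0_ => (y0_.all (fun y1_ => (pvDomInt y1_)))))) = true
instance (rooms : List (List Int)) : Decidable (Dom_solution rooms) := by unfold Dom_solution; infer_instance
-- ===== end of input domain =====

-- B replaces A's recursive closure-mutating DFS with an iterative explicit-stack traversal (same cost, no recursion).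


-- ===== PORT A =====
-- `def dfs(cur_v): visited[cur_v] = True; for next_v in rooms[cur_v]: if not visited[next_v]: dfs(next_v)`
-- The Nat argument is a fuel guard for totality only: with the fuel `solution` supplies it is never
-- exhausted on inputs satisfying Pre_solution (each recursive call is made on a room read back as
-- unvisited and marks it first, so the depth is bounded by len(rooms)); the body is otherwise a
-- step-for-step transliteration.  `visited[cur_v] = True` is PySem.List.pySetD and
-- `visited[next_v]` / `rooms[cur_v]` are PySem.List.pyGetD; out-of-range access raises IndexError
-- in Python — such inputs are excluded by Pre_solution, where the defaults are never consulted.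
def dfsA (rooms : List (List Int)) : Nat → List Bool → Int → List Bool
  | 0, visited, _ => visited
  | fuel+1, visited, cur =>
      let v := PySem.List.pySetD visited cur true
      (PySem.List.pyGetD rooms cur []).foldl
        (fun w nxt => if PySem.List.pyGetD w nxt true then w else dfsA rooms fuel w nxt) v

def solution (rooms : List (List Int)) : Bool :=
  let visited := List.replicate rooms.length false
  (dfsA rooms (rooms.length + 1) visited 0).all (fun b => b)

-- ===== PORT B =====
-- Lemma needed by bLoop's termination proof: marking a room that is read back as unvisited
-- strictly decreases the number of `false` entries of the visited list.
lemma pyIdx?_lt {n : Nat} {i : Int} {k : Nat} (h : PySem.List.pyIdx? n i = some k) : k < n := by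
  unfold PySem.List.pyIdx? at h
  split_ifs at h with h1 h2 h3 <;> simp_all <;> omega

lemma pyGetD_false_elim {v : List Bool} {i : Int}
    (h : PySem.List.pyGetD v i true = false) :
    ∃ k, PySem.List.pyIdx? v.length i = some k ∧ k < v.length ∧ v[k]? = some false ∧
      PySem.List.pySetD v i true = v.set k true := by
  unfold PySem.List.pyGetD PySem.List.pyGet? at h
  cases hk : PySem.List.pyIdx? v.length i with
  | none => rw [hk] at h; simp at h
  | some k =>
    rw [hk] at h
    refine ⟨k, rfl, pyIdx?_lt hk, ?_, ?_⟩
    · simp at h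
      cases hg : v[k]? with
      | none => rw [hg] at h; simp at h
      | some b => rw [hg] at h; simp at h; simp [h]
    · unfold PySem.List.pySetD PySem.List.pySet?
      rw [hk]; rfl

lemma pySetD_true_count_lt (v : List Bool) (i : Int)
    (h : PySem.List.pyGetD v i true = false) :
    (PySem.List.pySetD v i true).count false < v.count false := by
  obtain ⟨k, -, hk, hg, hset⟩ := pyGetD_false_elim h
  rw [hset, List.count_set hk]
  have hvk : v[k] = false := by
    have := List.getElem?_eq_getElem hk
    rw [this] at hg; exact Option.some.inj hg
  have hmem : false ∈ v := by rw [← hvk]; exact List.getElem_mem hk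
  have hpos : 0 < v.count false := List.count_pos_iff.mpr hmem
  simp [hvk]
  omega

-- `while stack: node = stack.pop(); if visited[node]: continue; visited[node] = True;
--  for nxt in rooms[node]: if not visited[nxt]: stack.append(nxt)`
-- The Lean list holds the Python stack top-first (Python pops/appends at the END of the list),
-- so pop = head and append = cons; visited[node] / rooms[node] as in port A.
def bLoop (rooms : List (List Int)) (visited : List Bool) (stack : List Int) : List Bool :=
  match stack with
  | [] => visited
  | node :: rest =>
    if _h : PySem.List.pyGetD visited node true then
      bLoop rooms visited rest
    else
      let v := PySem.List.pySetD visited node true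
      bLoop rooms v ((PySem.List.pyGetD rooms node []).foldl
        (fun st j => if PySem.List.pyGetD v j true then st else j :: st) rest)
termination_by (visited.count false, stack.length)
decreasing_by
  · exact Prod.Lex.right _ (Nat.lt_succ_self _)
  · exact Prod.Lex.left _ _ (pySetD_true_count_lt visited node (by simpa using _h))

def solution_alt (rooms : List (List Int)) : Bool :=
  (bLoop rooms (List.replicate rooms.length false) [0]).all (fun b => b)


-- ===== PRECONDITION & SPEC =====
-- pvReached rooms: the positions of the rooms reachable from room 0 along keys (a key j names the
-- room at Python index j, i.e. with negative-index wraparound); computed as a bounded monotone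
-- closure — len(rooms) rounds suffice since each round either reaches a fixpoint or adds a room.
def pvStep (rooms : List (List Int)) (s : List Nat) : List Nat :=
  s.foldl (fun acc k =>
    ((rooms[k]?).getD []).foldl (fun acc j =>
      match PySem.List.pyIdx? rooms.length j with
      | some m => if m ∈ acc then acc else acc ++ [m]
      | none => acc) acc) s

def pvReached (rooms : List (List Int)) : List Nat :=
  (fun s => pvStep rooms s)^[rooms.length] [0]

-- Pre_ is exactly the inputs on which A returns normally: `rooms` non-empty and every key of
-- every room reachable from room 0 a valid Python index into `rooms` (A raises IndexError on
-- empty `rooms` and on the first reached key outside [-len(rooms), len(rooms)); so does B;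
-- keys of unreachable rooms are never looked at by either program).
def Pre_solution (rooms : List (List Int)) : Prop :=
  rooms ≠ [] ∧ ∀ k ∈ pvReached rooms, ∀ j ∈ (rooms[k]?).getD [],
    -(rooms.length : Int) ≤ j ∧ j < (rooms.length : Int)
instance (rooms : List (List Int)) : Decidable (Pre_solution rooms) := by
  unfold Pre_solution; infer_instance
def pvWitness_solution : List (List Int) := [[1], [0]]
def Spec_solution (rooms : List (List Int)) (out : Bool) : Prop := out = solution_alt rooms
instance (rooms : List (List Int)) (out : Bool) : Decidable (Spec_solution rooms out) := by
  unfold Spec_solution; infer_instance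

-- ===== CLAIM (what is proved, stated in full; the proofs are below) =====
def Claim_equal_solution : Prop := ∀ (rooms : List (List Int)), Dom_solution rooms → Pre_solution rooms → Spec_solution rooms (solution rooms)

-- ===== LEMMAS AND PROOFS =====
-- Both traversals are analysed through POSITIONS (the Nat index a Python key resolves to via
-- PySem.List.pyIdx?, which folds negative keys by wraparound).

-- `M v u` : key u reads back as visited (out-of-range reads default to true: nothing to do there).
def M (v : List Bool) (u : Int) : Bool := PySem.List.pyGetD v u true
-- `MP v k` : position k is marked visited.
def MP (v : List Bool) (k : Nat) : Prop := v[k]? = some true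
-- `nbrsP rooms k` : the key list of the room at position k.
def nbrsP (rooms : List (List Int)) (k : Nat) : List Int := (rooms[k]?).getD []
-- positions reachable from room 0
inductive ReachP (rooms : List (List Int)) : Nat → Prop
  | zero (h : 0 < rooms.length) : ReachP rooms 0
  | step {k m : Nat} {j : Int} : ReachP rooms k → j ∈ nbrsP rooms k →
      PySem.List.pyIdx? rooms.length j = some m → ReachP rooms m
-- visited positions closed under keys, except at positions listed in S
def CEP (rooms : List (List Int)) (v : List Bool) (S : List Nat) : Prop :=
  ∀ k : Nat, k ∉ S → MP v k → ∀ j ∈ nbrsP rooms k, ∀ m : Nat,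
    PySem.List.pyIdx? rooms.length j = some m → MP v m
-- every visited position is reachable
def SoundP (rooms : List (List Int)) (v : List Bool) : Prop :=
  ∀ k : Nat, v[k]? = some true → ReachP rooms k

lemma pySetD_none {v : List Bool} {c : Int} (h : PySem.List.pyIdx? v.length c = none) :
    PySem.List.pySetD v c true = v := by
  unfold PySem.List.pySetD PySem.List.pySet?; rw [h]; rfl

lemma pySetD_some {v : List Bool} {c : Int} {k : Nat} (h : PySem.List.pyIdx? v.length c = some k) :
    PySem.List.pySetD v c true = v.set k true := by
  unfold PySem.List.pySetD PySem.List.pySet?; rw [h]; rfl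

lemma M_idx (v : List Bool) (u : Int) :
    M v u = ((PySem.List.pyIdx? v.length u).bind (fun k => v[k]?)).getD true := by
  rfl

lemma M_pos {v : List Bool} {u : Int} {k : Nat} (hk : PySem.List.pyIdx? v.length u = some k) :
    M v u = true ↔ MP v k := by
  rw [M_idx, hk]
  have hlt : k < v.length := pyIdx?_lt hk
  rw [Option.bind_some, List.getElem?_eq_getElem hlt]
  unfold MP
  rw [List.getElem?_eq_getElem hlt]
  simp

lemma MP_set_self {v : List Bool} {k : Nat} (h : k < v.length) : MP (v.set k true) k := by
  unfold MP
  simp [h]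

lemma MP_set_mono {v : List Bool} {k m : Nat} (h : MP v m) : MP (v.set k true) m := by
  unfold MP at h ⊢
  rw [List.getElem?_set]
  by_cases he : k = m
  · subst he
    have : k < v.length := by
      by_contra hlt
      rw [List.getElem?_eq_none (by omega)] at h
      exact absurd h (by simp)
    simp [this]
  · rw [if_neg he]; exact h

lemma MP_set_other {v : List Bool} {k m : Nat} (h : m ≠ k) :
    MP (v.set k true) m ↔ MP v m := by
  unfold MP
  rw [List.getElem?_set, if_neg (fun he => h he.symm)]

lemma idx_zero {n : Nat} (h : 0 < n) : PySem.List.pyIdx? n 0 = some 0 := by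
  unfold PySem.List.pyIdx?
  simp
  omega

lemma nbrs_pos {rooms : List (List Int)} {c : Int} {k : Nat}
    (hk : PySem.List.pyIdx? rooms.length c = some k) :
    PySem.List.pyGetD rooms c [] = nbrsP rooms k := by
  unfold PySem.List.pyGetD PySem.List.pyGet? nbrsP
  rw [hk]; rfl

lemma nbrs_none {rooms : List (List Int)} {c : Int}
    (hk : PySem.List.pyIdx? rooms.length c = none) :
    PySem.List.pyGetD rooms c [] = [] := by
  unfold PySem.List.pyGetD PySem.List.pyGet?
  rw [hk]; rfl

lemma pySetD_count_le (v : List Bool) (c : Int) :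
    (PySem.List.pySetD v c true).count false ≤ v.count false := by
  cases hk : PySem.List.pyIdx? v.length c with
  | none => rw [pySetD_none hk]
  | some k =>
    rw [pySetD_some hk, List.count_set (pyIdx?_lt hk)]
    simp

lemma foldl_pres {α σ : Type _} {P : σ → Prop} {f : σ → α → σ} (h : ∀ s a, P s → P (f s a)) :
    ∀ (l : List α) (s : σ), P s → P (l.foldl f s) := by
  intro l
  induction l with
  | nil => intro s hs; exact hs
  | cons a l ih => intro s hs; exact ih _ (h s a hs)

lemma foldl_pres_mem {α σ : Type _} {P : σ → Prop} {f : σ → α → σ} :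
    ∀ (l : List α), (∀ s a, a ∈ l → P s → P (f s a)) → ∀ s, P s → P (l.foldl f s) := by
  intro l
  induction l with
  | nil => intro _ s hs; exact hs
  | cons a l ih =>
    intro h s hs
    exact ih (fun s b hb => h s b (List.mem_cons_of_mem a hb)) _ (h s a List.mem_cons_self hs)

lemma CEP_anti {rooms : List (List Int)} {v : List Bool} {S T : List Nat}
    (h : CEP rooms v S) (hST : ∀ x ∈ S, x ∈ T) : CEP rooms v T := by
  intro k hnot hM j hj m hm
  exact h k (fun hmem => hnot (hST k hmem)) hM j hj m hm

lemma dfsA_len (rooms : List (List Int)) :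
    ∀ (f : Nat) (v : List Bool) (c : Int), (dfsA rooms f v c).length = v.length := by
  intro f
  induction f with
  | zero => intro v c; rfl
  | succ f ih =>
    intro v c
    show ((PySem.List.pyGetD rooms c []).foldl _ (PySem.List.pySetD v c true)).length = v.length
    exact foldl_pres (P := fun w : List Bool => w.length = v.length)
      (f := fun w nxt => if PySem.List.pyGetD w nxt true then w else dfsA rooms f w nxt)
      (by intro s a hs; dsimp only; split
          · exact hs
          · rw [ih]; exact hs)
      (PySem.List.pyGetD rooms c []) (PySem.List.pySetD v c true)
      (PySem.List.length_pySetD v c true)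

lemma dfsA_count (rooms : List (List Int)) :
    ∀ (f : Nat) (v : List Bool) (c : Int), (dfsA rooms f v c).count false ≤ v.count false := by
  intro f
  induction f with
  | zero => intro v c; exact le_refl _
  | succ f ih =>
    intro v c
    show ((PySem.List.pyGetD rooms c []).foldl _ (PySem.List.pySetD v c true)).count false
        ≤ v.count false
    exact foldl_pres (P := fun w : List Bool => w.count false ≤ v.count false)
      (f := fun w nxt => if PySem.List.pyGetD w nxt true then w else dfsA rooms f w nxt)
      (by intro s a hs; dsimp only; split
          · exact hs
          · exact le_trans (ih s a) hs)
      (PySem.List.pyGetD rooms c []) (PySem.List.pySetD v c true)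
      (pySetD_count_le v c)

lemma dfsA_mono (rooms : List (List Int)) :
    ∀ (f : Nat) (v : List Bool) (c : Int) (m : Nat), MP v m → MP (dfsA rooms f v c) m := by
  intro f
  induction f with
  | zero => intro v c m h; exact h
  | succ f ih =>
    intro v c m h
    show MP ((PySem.List.pyGetD rooms c []).foldl _ (PySem.List.pySetD v c true)) m
    refine foldl_pres (P := fun w : List Bool => MP w m)
      (f := fun w nxt => if PySem.List.pyGetD w nxt true then w else dfsA rooms f w nxt)
      (by intro s a hs; dsimp only; split
          · exact hs
          · exact ih s a m hs)
      (PySem.List.pyGetD rooms c []) (PySem.List.pySetD v c true) ?_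
    cases hk : PySem.List.pyIdx? v.length c with
    | none => rw [pySetD_none hk]; exact h
    | some k => rw [pySetD_some hk]; exact MP_set_mono h

lemma dfsA_main {rooms : List (List Int)} :
    ∀ (f : Nat) (v : List Bool) (c : Int) (S : List Nat) (k : Nat),
      v.length = rooms.length → v.count false < f → M v c = false →
      PySem.List.pyIdx? rooms.length c = some k →
      MP (dfsA rooms f v c) k ∧
      (CEP rooms v (k :: S) →
        CEP rooms (dfsA rooms f v c) S ∧
        ∀ j ∈ nbrsP rooms k, ∀ m : Nat, PySem.List.pyIdx? rooms.length j = some m →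
          MP (dfsA rooms f v c) m) := by
  intro f
  induction f with
  | zero => intro v c S k _ hcnt _ _; exact absurd hcnt (Nat.not_lt_zero _)
  | succ f ih =>
    intro v c S k hlen hcnt hc hidx
    obtain ⟨k', hidx', hk'lt, hgf, hset⟩ := pyGetD_false_elim (by simpa [M] using hc)
    rw [hlen, hidx] at hidx'
    obtain rfl : k = k' := Option.some.inj hidx'
    have hklt : k < v.length := hk'lt
    have hnbr : PySem.List.pyGetD rooms c [] = nbrsP rooms k := nbrs_pos hidx
    have hv0cnt : (v.set k true).count false < v.count false := by
      rw [← hset]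
      exact pySetD_true_count_lt v c (by simpa [M] using hc)
    have hR : dfsA rooms (f+1) v c =
        (nbrsP rooms k).foldl
          (fun w nxt => if PySem.List.pyGetD w nxt true then w else dfsA rooms f w nxt)
          (v.set k true) := by
      show (PySem.List.pyGetD rooms c []).foldl _ (PySem.List.pySetD v c true) = _
      rw [hnbr, hset]
    have hmono : ∀ (m : Nat) (l : List Int) (w : List Bool), MP w m →
        MP (l.foldl
          (fun w nxt => if PySem.List.pyGetD w nxt true then w else dfsA rooms f w nxt) w) m := by
      intro m l w hw
      refine foldl_pres (P := fun x : List Bool => MP x m) ?_ l w hw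
      intro s b hs
      by_cases hb : PySem.List.pyGetD s b true = true
      · simpa [hb] using hs
      · simp only [if_neg hb]; exact dfsA_mono rooms f s b m hs
    -- fold invariant, by induction over the processed key list
    have Q : ∀ (l : List Int), ∀ (w : List Bool),
        w.length = rooms.length → w.count false < f → MP w k → CEP rooms w (k :: S) →
        (let R := l.foldl
            (fun w nxt => if PySem.List.pyGetD w nxt true then w else dfsA rooms f w nxt) w;
          R.length = rooms.length ∧ R.count false < f ∧ MP R k ∧ CEP rooms R (k :: S) ∧
          ∀ j ∈ l, ∀ m : Nat, PySem.List.pyIdx? rooms.length j = some m → MP R m) := by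
      intro l
      induction l with
      | nil =>
        intro w hwlen hwcnt hMwk hCEw
        exact ⟨hwlen, hwcnt, hMwk, hCEw, fun j hj => absurd hj (List.not_mem_nil)⟩
      | cons a l ihl =>
        intro w hwlen hwcnt hMwk hCEw
        simp only [List.foldl_cons]
        by_cases ha : PySem.List.pyGetD w a true = true
        · rw [if_pos ha]
          obtain ⟨h1, h2, h3, h4, h5⟩ := ihl w hwlen hwcnt hMwk hCEw
          refine ⟨h1, h2, h3, h4, ?_⟩
          intro j hj m hm
          rcases List.mem_cons.1 hj with rfl | hj'
          · -- j was already marked: its position stays marked through the fold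
            have : MP w m := (M_pos (by rw [hwlen]; exact hm)).1 (by simpa [M] using ha)
            exact hmono m l w this
          · exact h5 j hj' m hm
        · rw [if_neg ha]
          have hafalse : PySem.List.pyGetD w a true = false := by simpa using ha
          obtain ⟨ma, hma, hmalt, hgfa, hseta⟩ := pyGetD_false_elim hafalse
          rw [hwlen] at hma
          obtain ⟨hMPa, hrest⟩ := ih w a (k :: S) ma hwlen hwcnt (by simpa [M] using ha) hma
          have hCEw' : CEP rooms w (ma :: k :: S) :=
            CEP_anti hCEw (fun x hx => List.mem_cons_of_mem ma hx)
          have hCE' : CEP rooms (dfsA rooms f w a) (k :: S) := (hrest hCEw').1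
          have hlen' : (dfsA rooms f w a).length = rooms.length := by
            rw [dfsA_len]; exact hwlen
          have hcnt' : (dfsA rooms f w a).count false < f :=
            lt_of_le_of_lt (dfsA_count rooms f w a) hwcnt
          have hMk' : MP (dfsA rooms f w a) k := dfsA_mono rooms f w a k hMwk
          obtain ⟨h1, h2, h3, h4, h5⟩ := ihl (dfsA rooms f w a) hlen' hcnt' hMk' hCE'
          refine ⟨h1, h2, h3, h4, ?_⟩
          intro j hj m hm
          rcases List.mem_cons.1 hj with rfl | hj'
          · have hmm : m = ma := by rw [hm] at hma; exact Option.some.inj hma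
            rw [hmm]
            exact hmono ma l (dfsA rooms f w j) hMPa
          · exact h5 j hj' m hm
    have hv0len : (v.set k true).length = rooms.length := by
      rw [List.length_set]; exact hlen
    have hv0cnt' : (v.set k true).count false < f := by omega
    have hMv0k : MP (v.set k true) k := MP_set_self hklt
    rw [hR]
    constructor
    · exact hmono k (nbrsP rooms k) (v.set k true) hMv0k
    · intro hCEv
      have hCEv0 : CEP rooms (v.set k true) (k :: S) := by
        intro kk hnot hMP j hj m hm
        have hkkne : kk ≠ k := fun h => hnot (h ▸ List.mem_cons_self)
        rw [MP_set_other hkkne] at hMP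
        exact MP_set_mono (hCEv kk hnot hMP j hj m hm)
      obtain ⟨_, _, hMRk, hCER, hnbrsR⟩ :=
        Q (nbrsP rooms k) (v.set k true) hv0len hv0cnt' hMv0k hCEv0
      refine ⟨?_, hnbrsR⟩
      intro kk hnot hMP j hj m hm
      rcases eq_or_ne kk k with rfl | hkkne
      · exact hnbrsR j hj m hm
      · exact hCER kk (by simp [hnot, hkkne]) hMP j hj m hm

lemma dfsA_sound {rooms : List (List Int)} :
    ∀ (f : Nat) (v : List Bool) (c : Int), v.length = rooms.length →
      (∀ k : Nat, PySem.List.pyIdx? rooms.length c = some k → ReachP rooms k) →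
      SoundP rooms v → SoundP rooms (dfsA rooms f v c) := by
  intro f
  induction f with
  | zero => intro v c _ _ hS; exact hS
  | succ f ih =>
    intro v c hlen hrc hS
    have hS0 : SoundP rooms (PySem.List.pySetD v c true) := by
      cases hk : PySem.List.pyIdx? v.length c with
      | none => rw [pySetD_none hk]; exact hS
      | some k =>
        rw [pySetD_some hk]
        intro m hm
        rcases eq_or_ne k m with rfl | hne
        · exact hrc k (by rw [← hlen]; exact hk)
        · rw [List.getElem?_set, if_neg hne] at hm
          exact hS m hm
    have hnbR : ∀ j ∈ PySem.List.pyGetD rooms c [],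
        ∀ m : Nat, PySem.List.pyIdx? rooms.length j = some m → ReachP rooms m := by
      intro j hj m hm
      cases hk : PySem.List.pyIdx? rooms.length c with
      | none => rw [nbrs_none hk] at hj; exact absurd hj (List.not_mem_nil)
      | some k =>
        rw [nbrs_pos hk] at hj
        exact ReachP.step (hrc k hk) hj hm
    show SoundP rooms ((PySem.List.pyGetD rooms c []).foldl _ (PySem.List.pySetD v c true))
    have := foldl_pres_mem (P := fun w : List Bool => SoundP rooms w ∧ w.length = rooms.length)
      (f := fun w nxt => if PySem.List.pyGetD w nxt true then w else dfsA rooms f w nxt)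
      (PySem.List.pyGetD rooms c [])
      (by intro s j hj hs
          by_cases hm : PySem.List.pyGetD s j true = true
          · simpa [hm] using hs
          · simp only [if_neg hm]
            refine ⟨ih s j hs.2 (fun m hm' => hnbR j hj m hm') hs.1, ?_⟩
            rw [dfsA_len]; exact hs.2)
      (PySem.List.pySetD v c true)
      ⟨hS0, by rw [PySem.List.length_pySetD]; exact hlen⟩
    exact this.1

lemma push_acc (v' : List Bool) :
    ∀ (l acc : List Int) (s : Int), s ∈ acc →
      s ∈ l.foldl (fun st j => if PySem.List.pyGetD v' j true then st else j :: st) acc := by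
  intro l
  induction l with
  | nil => intro acc s hs; exact hs
  | cons a l ih =>
    intro acc s hs
    simp only [List.foldl_cons]
    apply ih
    by_cases ha : PySem.List.pyGetD v' a true = true
    · simpa [ha] using hs
    · simp only [if_neg ha]; exact List.mem_cons_of_mem a hs

lemma push_mem (v' : List Bool) :
    ∀ (l acc : List Int) (j : Int), j ∈ l →
      PySem.List.pyGetD v' j true = true ∨
      j ∈ l.foldl (fun st j => if PySem.List.pyGetD v' j true then st else j :: st) acc := by
  intro l
  induction l with
  | nil => intro acc j hj; exact absurd hj (List.not_mem_nil)
  | cons a l ih =>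
    intro acc j hj
    simp only [List.foldl_cons]
    rcases List.mem_cons.1 hj with rfl | hj'
    · by_cases ha : PySem.List.pyGetD v' j true = true
      · exact Or.inl ha
      · right
        simp only [if_neg ha]
        exact push_acc v' l _ j List.mem_cons_self
    · exact ih _ j hj'

lemma push_sub (v' : List Bool) :
    ∀ (l acc : List Int) (s : Int),
      s ∈ l.foldl (fun st j => if PySem.List.pyGetD v' j true then st else j :: st) acc →
      s ∈ l ∨ s ∈ acc := by
  intro l
  induction l with
  | nil => intro acc s hs; exact Or.inr hs
  | cons a l ih =>
    intro acc s hs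
    simp only [List.foldl_cons] at hs
    rcases ih _ s hs with hl | hacc
    · exact Or.inl (List.mem_cons_of_mem a hl)
    · by_cases ha : PySem.List.pyGetD v' a true = true
      · rw [if_pos ha] at hacc; exact Or.inr hacc
      · rw [if_neg ha] at hacc
        rcases List.mem_cons.1 hacc with rfl | h
        · exact Or.inl List.mem_cons_self
        · exact Or.inr h

lemma bLoop_len (rooms : List (List Int)) (v : List Bool) (st : List Int) :
    (bLoop rooms v st).length = v.length := by
  fun_induction bLoop rooms v st with
  | case1 => rfl
  | case2 w node rest hn ih => exact ih
  | case3 w node rest hn v' ih =>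
    have hx : v'.length = w.length := by
      show (PySem.List.pySetD w node true).length = w.length
      rw [PySem.List.length_pySetD]
    exact ih.trans hx

lemma bLoop_mono (rooms : List (List Int)) (v : List Bool) (st : List Int) (m : Nat)
    (h : MP v m) : MP (bLoop rooms v st) m := by
  fun_induction bLoop rooms v st with
  | case1 => exact h
  | case2 w node rest hn ih => exact ih h
  | case3 w node rest hn v' ih =>
    refine ih ?_
    show MP (PySem.List.pySetD w node true) m
    cases hk : PySem.List.pyIdx? w.length node with
    | none => rw [pySetD_none hk]; exact h
    | some k => rw [pySetD_some hk]; exact MP_set_mono h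

lemma bLoop_main {rooms : List (List Int)} :
    ∀ (v : List Bool) (st : List Int), v.length = rooms.length →
      (∀ k : Nat, MP v k → ∀ j ∈ nbrsP rooms k, ∀ m : Nat,
        PySem.List.pyIdx? rooms.length j = some m → (MP v m ∨ j ∈ st)) →
      (∀ s ∈ st, ∀ p : Nat, PySem.List.pyIdx? rooms.length s = some p →
        MP (bLoop rooms v st) p) ∧ CEP rooms (bLoop rooms v st) [] := by
  intro v st
  fun_induction bLoop rooms v st with
  | case1 w =>
    intro _ hInv
    refine ⟨fun s hs => absurd hs List.not_mem_nil, ?_⟩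
    intro k _ hM j hj m hm
    rcases hInv k hM j hj m hm with h | h
    · exact h
    · exact absurd h (List.not_mem_nil)
  | case2 w node rest hn ih =>
    intro hlen hInv
    have hInv' : ∀ k : Nat, MP w k → ∀ j ∈ nbrsP rooms k, ∀ m : Nat,
        PySem.List.pyIdx? rooms.length j = some m → (MP w m ∨ j ∈ rest) := by
      intro k hM j hj m hm
      rcases hInv k hM j hj m hm with h | h
      · exact Or.inl h
      · rcases List.mem_cons.1 h with rfl | h'
        · exact Or.inl ((M_pos (by rw [hlen]; exact hm)).1 (by simpa [M] using hn))
        · exact Or.inr h'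
    obtain ⟨h1, h2⟩ := ih hlen hInv'
    refine ⟨?_, h2⟩
    intro s hs p hp
    rcases List.mem_cons.1 hs with rfl | hs'
    · exact bLoop_mono rooms w rest p ((M_pos (by rw [hlen]; exact hp)).1 (by simpa [M] using hn))
    · exact h1 s hs' p hp
  | case3 w node rest hn v' ih =>
    intro hlen hInv
    have hnf : PySem.List.pyGetD w node true = false := by simpa using hn
    obtain ⟨p, hpidx, hplt, hgf, hset⟩ := pyGetD_false_elim hnf
    have hpidx' : PySem.List.pyIdx? rooms.length node = some p := by
      rw [← hlen]; exact hpidx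
    have hv'def : v' = w.set p true := hset
    have hnbr : PySem.List.pyGetD rooms node [] = nbrsP rooms p := nbrs_pos hpidx'
    have hlen' : v'.length = rooms.length := by
      rw [hv'def, List.length_set]; exact hlen
    have hInv' : ∀ k : Nat, MP v' k → ∀ j ∈ nbrsP rooms k, ∀ m : Nat,
        PySem.List.pyIdx? rooms.length j = some m →
        (MP v' m ∨ j ∈ (PySem.List.pyGetD rooms node []).foldl
          (fun st j => if PySem.List.pyGetD v' j true then st else j :: st) rest) := by
      intro k hM j hj m hm
      rcases eq_or_ne k p with rfl | hkne
      · rw [← hnbr] at hj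
        rcases push_mem v' (PySem.List.pyGetD rooms node []) rest j hj with h | h
        · exact Or.inl ((M_pos (by rw [hlen']; exact hm)).1 h)
        · exact Or.inr h
      · rw [hv'def, MP_set_other hkne] at hM
        rcases hInv k hM j hj m hm with h | h
        · exact Or.inl (hv'def ▸ MP_set_mono h)
        · rcases List.mem_cons.1 h with rfl | h'
          · have : m = p := by rw [hm] at hpidx'; exact Option.some.inj hpidx'
            rw [this, hv'def]
            exact Or.inl (MP_set_self hplt)
          · exact Or.inr (push_acc v' _ rest j h')
    obtain ⟨h1, h2⟩ := ih hlen' hInv'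
    refine ⟨?_, h2⟩
    intro s hs q hq
    rcases List.mem_cons.1 hs with rfl | hs'
    · have : q = p := by rw [hq] at hpidx'; exact Option.some.inj hpidx'
      rw [this]
      exact bLoop_mono rooms v' _ p (hv'def ▸ MP_set_self hplt)
    · exact h1 s (push_acc v' _ rest s hs') q hq

lemma bLoop_sound {rooms : List (List Int)} :
    ∀ (v : List Bool) (st : List Int), v.length = rooms.length →
      (∀ s ∈ st, ∀ p : Nat, PySem.List.pyIdx? rooms.length s = some p → ReachP rooms p) →
      SoundP rooms v → SoundP rooms (bLoop rooms v st) := by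
  intro v st
  fun_induction bLoop rooms v st with
  | case1 w => intro _ _ hS; exact hS
  | case2 w node rest hn ih =>
    intro hlen hst hS
    exact ih hlen (fun s hs => hst s (List.mem_cons_of_mem node hs)) hS
  | case3 w node rest hn v' ih =>
    intro hlen hst hS
    have hnf : PySem.List.pyGetD w node true = false := by simpa using hn
    obtain ⟨p, hpidx, hplt, hgf, hset⟩ := pyGetD_false_elim hnf
    have hpidx' : PySem.List.pyIdx? rooms.length node = some p := by
      rw [← hlen]; exact hpidx
    have hv'def : v' = w.set p true := hset
    have hpR : ReachP rooms p := hst node List.mem_cons_self p hpidx'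
    have hS' : SoundP rooms v' := by
      rw [hv'def]
      intro m hm
      rcases eq_or_ne p m with rfl | hne
      · exact hpR
      · have hm' : MP (w.set p true) m := hm
        rw [MP_set_other (Ne.symm hne)] at hm'
        exact hS m hm'
    have hlen' : v'.length = rooms.length := by
      rw [hv'def, List.length_set]; exact hlen
    refine ih hlen' ?_ hS'
    intro s hs q hq
    rcases push_sub v' _ rest s hs with h | h
    · rw [nbrs_pos hpidx'] at h
      exact ReachP.step hpR h hq
    · exact hst s (List.mem_cons_of_mem node h) q hq

lemma reach_marked {rooms : List (List Int)} {F : List Bool}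
    (h0 : MP F 0) (hcl : CEP rooms F []) :
    ∀ k : Nat, ReachP rooms k → MP F k := by
  intro k h
  induction h with
  | zero _ => exact h0
  | step h1 h2 h3 ih => exact hcl _ (List.not_mem_nil) ih _ h2 _ h3

lemma lists_agree {rooms : List (List Int)} {F Gl : List Bool}
    (hFlen : F.length = rooms.length) (hGlen : Gl.length = rooms.length)
    (hF0 : MP F 0) (hG0 : MP Gl 0)
    (hFcl : CEP rooms F []) (hGcl : CEP rooms Gl [])
    (hFs : SoundP rooms F) (hGs : SoundP rooms Gl) : F = Gl := by
  apply List.ext_getElem?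
  intro k
  by_cases hk : k < rooms.length
  · have hkF : k < F.length := by omega
    have hkG : k < Gl.length := by omega
    rw [List.getElem?_eq_getElem hkF, List.getElem?_eq_getElem hkG]
    cases hbF : F[k] <;> cases hbG : Gl[k]
    · rfl
    · have hR : ReachP rooms k := hGs k (by rw [List.getElem?_eq_getElem hkG, hbG])
      have := reach_marked hF0 hFcl k hR
      unfold MP at this
      rw [List.getElem?_eq_getElem hkF, hbF] at this
      simp at this
    · have hR : ReachP rooms k := hFs k (by rw [List.getElem?_eq_getElem hkF, hbF])
      have := reach_marked hG0 hGcl k hR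
      unfold MP at this
      rw [List.getElem?_eq_getElem hkG, hbG] at this
      simp at this
    · rfl
  · rw [List.getElem?_eq_none (by omega : F.length ≤ k),
      List.getElem?_eq_none (by omega : Gl.length ≤ k)]

lemma equiv_pre (rooms : List (List Int)) (hpre : Pre_solution rooms) :
    solution rooms = solution_alt rooms := by
  obtain ⟨hne, -⟩ := hpre
  have hn : 0 < rooms.length := List.length_pos_iff.mpr hne
  have hvlen : (List.replicate rooms.length false).length = rooms.length := by simp
  have hvcnt : (List.replicate rooms.length false).count false = rooms.length := by simp
  have hMPnone : ∀ k : Nat, ¬ MP (List.replicate rooms.length false) k := by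
    intro k hk
    unfold MP at hk
    rcases Nat.lt_or_ge k rooms.length with h | h
    · simp [h] at hk
    · simp [h] at hk
  have hM0 : M (List.replicate rooms.length false) 0 = false := by
    rw [M_idx, hvlen, idx_zero hn]
    simp [hn]
  have hCE0 : CEP rooms (List.replicate rooms.length false) [0] := by
    intro k _ hM _ _ _ _
    exact absurd hM (hMPnone k)
  have hInvB : ∀ k : Nat, MP (List.replicate rooms.length false) k →
      ∀ j ∈ nbrsP rooms k, ∀ m : Nat, PySem.List.pyIdx? rooms.length j = some m →
      (MP (List.replicate rooms.length false) m ∨ j ∈ ([0] : List Int)) := by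
    intro k hM
    exact absurd hM (hMPnone k)
  have hSound0 : SoundP rooms (List.replicate rooms.length false) := by
    intro k hk
    exact absurd hk (hMPnone k)
  -- port A's final visited list
  obtain ⟨hA0, hArest⟩ := dfsA_main (rooms := rooms) (rooms.length + 1)
    (List.replicate rooms.length false) 0 [] 0 hvlen (by omega) hM0 (idx_zero hn)
  obtain ⟨hAcl, -⟩ := hArest hCE0
  have hAlen : (dfsA rooms (rooms.length + 1) (List.replicate rooms.length false) 0).length
      = rooms.length := by rw [dfsA_len]; exact hvlen
  have hAs : SoundP rooms (dfsA rooms (rooms.length + 1) (List.replicate rooms.length false) 0) :=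
    dfsA_sound _ _ 0 hvlen
      (fun k hk => by rw [idx_zero hn] at hk; exact (Option.some.inj hk) ▸ ReachP.zero hn)
      hSound0
  -- port B's final visited list
  obtain ⟨hB1, hBcl⟩ := bLoop_main (List.replicate rooms.length false) [0] hvlen hInvB
  have hB0 : MP (bLoop rooms (List.replicate rooms.length false) [0]) 0 :=
    hB1 0 List.mem_cons_self 0 (idx_zero hn)
  have hBlen : (bLoop rooms (List.replicate rooms.length false) [0]).length = rooms.length := by
    rw [bLoop_len]; exact hvlen
  have hBs : SoundP rooms (bLoop rooms (List.replicate rooms.length false) [0]) :=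
    bLoop_sound _ [0] hvlen
      (by intro s hs p hp
          rcases List.mem_cons.1 hs with rfl | h
          · rw [idx_zero hn] at hp
            exact (Option.some.inj hp) ▸ ReachP.zero hn
          · exact absurd h (List.not_mem_nil)) hSound0
  have hFeq : dfsA rooms (rooms.length + 1) (List.replicate rooms.length false) 0
      = bLoop rooms (List.replicate rooms.length false) [0] :=
    lists_agree hAlen hBlen hA0 hB0 hAcl hBcl hAs hBs
  show (dfsA rooms (rooms.length + 1) (List.replicate rooms.length false) 0).all (fun b => b)
      = (bLoop rooms (List.replicate rooms.length false) [0]).all (fun b => b)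
  rw [hFeq]

-- ===== VERDICT (by name: the statement is the Claim_ definition above) =====
theorem solution_spec : Claim_equal_solution := by
  intro rooms _ hpre
  unfold Spec_solution
  exact equiv_pre rooms hpre
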